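-- pv_equiv track=rewrite | github.com/xtudbxk/practice | python/policy-play_cards.py | get_max_points
-- ===== SOURCE A (Python) =====
-- def get_max_points(card_points,max_card_once):
--     if len(card_points) <= max_card_once:
--         return sum(card_points)
--
--     # initialization
--     sum_n = 0
--     max_points = []
--     for index in range(max_card_once):
--         sum_n += card_points[-index-1]
--         max_points.append(sum_n)
--
--     # compute max_points
--     for index in range(max_card_once,len(card_points)):
--         sum_n += card_points[-index-1]
--         max_points.append(sum_n - max_points[-1])
--         for index2 in range(1,max_card_once):
--             max_points[-1] = max(max_points[-1],sum_n - max_points[-index2-2])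
--
--     return max_points[-1]
-- ===== SOURCE B (Python) =====
-- from collections import deque
--
-- def get_max_points(card_points, max_card_once):
--     n = len(card_points)
--     if n <= max_card_once:
--         return sum(card_points)
--     k = max_card_once
--     rev = card_points[::-1]
--     dp = []
--     dq = deque()  # indices into dp, dp values strictly increasing along dq
--     s = 0
--     for i in range(n):
--         s += rev[i]
--         if i < k:
--             v = s
--         else:
--             v = s - dp[dq[0]]  # dq[0] = argmin of dp over the last k indices
--         dp.append(v)
--         while dq and dp[dq[-1]] >= v:
--             dq.pop()
--         dq.append(i)
--         if dq[0] <= i - k: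
--             dq.popleft()
--     return dp[-1]
-- ===== Notes on version B (the rewrite author's own statement) =====
-- stated objective: faster
-- what changed: A recomputes the window minimum by rescanning the k previous DP entries at every step (inner max-loop over max_points[-2..-k-1]); B keeps a monotonic deque of candidate indices so each DP value is obtained from the deque front, giving one amortized O(1) step per card.
import Mathlib
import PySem

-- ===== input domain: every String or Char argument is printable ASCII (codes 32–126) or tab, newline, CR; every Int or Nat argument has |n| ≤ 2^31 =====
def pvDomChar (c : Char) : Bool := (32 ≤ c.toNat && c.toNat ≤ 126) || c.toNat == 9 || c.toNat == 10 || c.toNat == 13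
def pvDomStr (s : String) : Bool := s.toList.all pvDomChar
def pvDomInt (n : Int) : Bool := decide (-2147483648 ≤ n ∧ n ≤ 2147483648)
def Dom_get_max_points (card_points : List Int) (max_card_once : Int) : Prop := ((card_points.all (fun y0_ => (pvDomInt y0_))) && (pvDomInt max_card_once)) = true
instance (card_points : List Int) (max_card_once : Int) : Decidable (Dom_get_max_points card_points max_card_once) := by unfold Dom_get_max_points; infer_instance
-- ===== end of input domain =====

-- B replaces A's O(n·k) inner rescan of the k previous DP entries by a monotonic-deque
-- sliding-window minimum (O(n)); same return value on all inputs admitted by Pre_.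

-- ===== PORT A =====
-- literal transliteration of A: two foldl loops over Python ranges, a list `max_points`
-- grown by append, negative indexing via PySem.List.pyGet? (getD 0 is unreachable under Pre_)
def get_max_points (card_points : List Int) (max_card_once : Int) : Int :=
  if (card_points.length : Int) ≤ max_card_once then card_points.sum
  else
    -- initialization loop: for index in range(max_card_once)
    let init : Int × List Int :=
      (PySem.List.pyRange 0 max_card_once 1).foldl
        (fun st index =>
          let s := st.1 + (PySem.List.pyGet? card_points (-index - 1)).getD 0
          (s, st.2 ++ [s]))
        (0, [])
    -- main loop: for index in range(max_card_once, len(card_points))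
    let fin : Int × List Int :=
      (PySem.List.pyRange max_card_once (card_points.length : Int) 1).foldl
        (fun st index =>
          let s := st.1 + (PySem.List.pyGet? card_points (-index - 1)).getD 0
          let mp := st.2 ++ [s - (PySem.List.pyGet? st.2 (-1)).getD 0]
          -- inner loop: for index2 in range(1, max_card_once):
          --   max_points[-1] = max(max_points[-1], sum_n - max_points[-index2-2])
          let mp :=
            (PySem.List.pyRange 1 max_card_once 1).foldl
              (fun mp index2 =>
                mp.dropLast ++
                  [max ((PySem.List.pyGet? mp (-1)).getD 0)
                       (s - (PySem.List.pyGet? mp (-index2 - 2)).getD 0)])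
              mp
          (s, mp))
        init
    (PySem.List.pyGet? fin.2 (-1)).getD 0

-- ===== PORT B =====
-- helper: `while dq and dp[dq[-1]] >= v: dq.pop()` — pop from the right end of the deque
def popWhileGE (dp : List Int) (v : Int) (dq : List Nat) : List Nat :=
  match h : dq.getLast? with
  | none => []
  | some j => if v ≤ dp.getD j 0 then popWhileGE dp v dq.dropLast else dq
termination_by dq.length
decreasing_by
  have : dq ≠ [] := by intro hn; simp [hn] at h
  simpa [List.length_dropLast] using Nat.sub_lt (List.length_pos_of_ne_nil this) one_pos

-- transliteration of B: one pass over the reversed list, dp grown by append,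
-- deque of indices as a List Nat (head = left end)
def get_max_points_alt (card_points : List Int) (max_card_once : Int) : Int :=
  let n := card_points.length
  if (n : Int) ≤ max_card_once then card_points.sum
  else
    let k := max_card_once.toNat
    let rev := card_points.reverse          -- card_points[::-1]
    let st : Int × List Int × List Nat :=
      (List.range n).foldl
        (fun st i =>
          let s := st.1 + rev.getD i 0
          let dp := st.2.1
          let dq := st.2.2
          let v := if i < k then s else s - dp.getD (dq.headD 0) 0   -- dp[dq[0]]
          let dp := dp ++ [v]
          let dq := popWhileGE dp v dq
          let dq := dq ++ [i]
          let dq := if dq.headD 0 + k ≤ i then dq.tail else dq       -- if dq[0] <= i-k: popleft()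
          (s, dp, dq))
        (0, [], [])
    st.2.1.getLastD 0                        -- dp[-1]

-- ===== PRECONDITION & SPEC =====
-- Pre_ excludes exactly the inputs on which A raises IndexError: max_card_once < 1
-- while len(card_points) > max_card_once (the DP loop then reads an empty/short list).
def Pre_get_max_points (card_points : List Int) (max_card_once : Int) : Prop :=
  (card_points.length : Int) ≤ max_card_once ∨ 1 ≤ max_card_once
instance (card_points : List Int) (max_card_once : Int) : Decidable (Pre_get_max_points card_points max_card_once) := by unfold Pre_get_max_points; infer_instance

def pvWitness_get_max_points : List Int × Int := ([3, -1, 4, 1, -5, 9], 2)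

def Spec_get_max_points (card_points : List Int) (max_card_once : Int) (out : Int) : Prop := out = get_max_points_alt card_points max_card_once
instance (card_points : List Int) (max_card_once : Int) (out : Int) : Decidable (Spec_get_max_points card_points max_card_once out) := by unfold Spec_get_max_points; infer_instance

-- ===== CLAIM (what is proved, stated in full; the proofs are below) =====
def Claim_equal_get_max_points : Prop := ∀ (card_points : List Int) (max_card_once : Int), Dom_get_max_points card_points max_card_once → Pre_get_max_points card_points max_card_once → Spec_get_max_points card_points max_card_once (get_max_points card_points max_card_once)

-- ===== LEMMAS AND PROOFS =====


-- minimum of the last k entries of l (the DP window)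
def wmin (k : Nat) (l : List Int) : Int := ((l.drop (l.length - k)).min?).getD 0

theorem wmin_spec (k : Nat) (l : List Int) (hk : 1 ≤ k) (hl : l ≠ []) :
    wmin k l ∈ l.drop (l.length - k) ∧ ∀ x ∈ l.drop (l.length - k), wmin k l ≤ x := by
  have hlen : 0 < l.length := List.length_pos_of_ne_nil hl
  have hW : l.drop (l.length - k) ≠ [] := by
    intro h
    have := congrArg List.length h
    simp at this
    omega
  cases h : (l.drop (l.length - k)).min? with
  | none => exact absurd (List.min?_eq_none_iff.mp h) hW
  | some m =>
    have h2 := List.min?_eq_some_iff.mp h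
    constructor
    · simpa [wmin, h] using h2.1
    · intro x hx
      simpa [wmin, h] using h2.2 x hx

theorem mem_window (l : List Int) (k j : Nat) (hj : j < l.length) (hj2 : l.length ≤ j + k) :
    l.getD j 0 ∈ l.drop (l.length - k) := by
  rw [List.mem_iff_getElem]
  refine ⟨j - (l.length - k), by simp; omega, ?_⟩
  rw [List.getElem_drop]
  have heq : l.length - k + (j - (l.length - k)) = j := by omega
  simp only [List.getD_eq_getElem?_getD, List.getElem?_eq_getElem hj]
  simp only [heq, Option.getD_some]

theorem window_mem (l : List Int) (k : Nat) (x : Int) (hx : x ∈ l.drop (l.length - k)) :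
    ∃ j, j < l.length ∧ l.length ≤ j + k ∧ x = l.getD j 0 := by
  rw [List.mem_iff_getElem] at hx
  obtain ⟨t, ht, hval⟩ := hx
  rw [List.getElem_drop] at hval
  simp at ht
  refine ⟨l.length - k + t, by omega, by omega, ?_⟩
  rw [List.getD_eq_getElem?_getD, List.getElem?_eq_getElem (by omega)]
  simp [hval]

def g (l : List Int) (t : Nat) : Int := l.getD (l.length - 1 - t) 0

def gmin (l : List Int) (m : Nat) : Int :=
  (List.range m).foldl (fun c j => min c (g l (j + 1))) (g l 0)

theorem gmin_succ (l : List Int) (m : Nat) :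
    gmin l (m + 1) = min (gmin l m) (g l (m + 1)) := by
  simp [gmin, List.range_succ]

theorem gmin_le (l : List Int) (m t : Nat) (ht : t ≤ m) : gmin l m ≤ g l t := by
  induction m with
  | zero => simp_all [gmin]
  | succ m ih =>
    rw [gmin_succ]
    rcases Nat.lt_or_ge t (m + 1) with h | h
    · exact le_trans (min_le_left _ _) (ih (by omega))
    · have : t = m + 1 := by omega
      subst this
      exact min_le_right _ _
theorem gmin_mem (l : List Int) (m : Nat) : ∃ t, t ≤ m ∧ gmin l m = g l t := by
  induction m with
  | zero => exact ⟨0, le_refl _, rfl⟩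
  | succ m ih =>
    obtain ⟨t, ht, heq⟩ := ih
    rw [gmin_succ]
    rcases le_total (gmin l m) (g l (m + 1)) with h | h
    · exact ⟨t, by omega, by rw [min_eq_left h]; exact heq⟩
    · exact ⟨m + 1, le_refl _, min_eq_right h⟩

theorem gmin_eq_wmin (l : List Int) (k : Nat) (hk : 1 ≤ k) (hkL : k ≤ l.length) :
    gmin l (k - 1) = wmin k l := by
  have hl : l ≠ [] := by intro h; simp [h] at hkL; omega
  obtain ⟨hmem, hlb⟩ := wmin_spec k l hk hl
  apply le_antisymm
  · obtain ⟨j, hj, hj2, hx⟩ := window_mem l k _ hmem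
    have h1 : gmin l (k - 1) ≤ g l (l.length - 1 - j) := gmin_le l _ _ (by omega)
    have h2 : g l (l.length - 1 - j) = l.getD j 0 := by
      unfold g; congr 1; omega
    rw [hx]; rw [h2] at h1; exact h1
  · obtain ⟨t, ht, heq⟩ := gmin_mem l (k - 1)
    rw [heq]
    exact hlb _ (mem_window l k (l.length - 1 - t) (by omega) (by omega))

theorem pyGet_neg_one_g0 (l : List Int) :
    (PySem.List.pyGet? l (-1)).getD 0 = g l 0 := by
  rw [PySem.List.pyGet?_neg_one]
  cases l with
  | nil => simp [g]
  | cons x xs =>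
    rw [List.getLast?_eq_getElem?]
    simp [g, List.getD_eq_getElem?_getD]

theorem innerFold_aux (s : Int) (l : List Int) (k : Nat) (hkL : k ≤ l.length) :
    ∀ m, m + 1 ≤ k →
    (PySem.List.pyRange 1 ((m : Int) + 1) 1).foldl
      (fun mp index2 => mp.dropLast ++
        [max ((PySem.List.pyGet? mp (-1)).getD 0)
             (s - (PySem.List.pyGet? mp (-index2 - 2)).getD 0)])
      (l ++ [s - g l 0]) = l ++ [s - gmin l m] := by
  intro m
  induction m with
  | zero => intro _; rw [PySem.List.pyRange_one_eq_nil (by omega)]; simp [gmin]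
  | succ m ih =>
    intro hm
    have hsplit : PySem.List.pyRange 1 ((m : Int) + 1 + 1) 1
        = PySem.List.pyRange 1 ((m : Int) + 1) 1 ++ [(m : Int) + 1] := by
      have := PySem.List.pyRange_one_succ_right (a := 1) (b := (m : Int) + 1) (by omega)
      simpa using this
    push_cast
    rw [hsplit, List.foldl_append, ih (by omega)]
    -- evaluate one body step on l ++ [s - gmin l m]
    simp only [List.foldl_cons, List.foldl_nil]
    rw [List.dropLast_concat, PySem.List.pyGet?_neg_one_append_singleton]
    have hidx : (-((m : Int) + 1) - 2) = -(((m + 3 : Nat)) : Int) := by push_cast; ring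
    rw [hidx, PySem.List.pyGet?_neg_natCast (l ++ [s - gmin l m]) (m + 3) (by omega)
        (by simp; omega)]
    have hlen : (l ++ [s - gmin l m]).length - (m + 3) = l.length - 2 - m := by
      simp; omega
    rw [hlen, List.getElem?_append_left (by omega)]
    have hval : l[l.length - 2 - m]? = some (g l (m + 1)) := by
      rw [List.getElem?_eq_getElem (by omega)]
      unfold g
      rw [List.getD_eq_getElem?_getD, List.getElem?_eq_getElem (by omega)]
      simp only [Option.getD_some, Option.some.injEq]
      congr 1
      omega
    rw [hval]
    simp only [Option.getD_some]
    rw [gmin_succ]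
    have : max (s - gmin l m) (s - g l (m + 1)) = s - min (gmin l m) (g l (m + 1)) := by omega
    rw [this]

theorem innerFold (s : Int) (l : List Int) (k : Nat) (hk : 1 ≤ k) (hkL : k ≤ l.length) :
    (PySem.List.pyRange 1 (k : Int) 1).foldl
      (fun mp index2 => mp.dropLast ++
        [max ((PySem.List.pyGet? mp (-1)).getD 0)
             (s - (PySem.List.pyGet? mp (-index2 - 2)).getD 0)])
      (l ++ [s - g l 0]) = l ++ [s - wmin k l] := by
  have hcast : (k : Int) = ((k - 1 : Nat) : Int) + 1 := by push_cast [hk]; omega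
  rw [hcast, innerFold_aux s l k hkL (k - 1) (by omega), gmin_eq_wmin l k hk hkL]

-- the shared reference step: s accumulates the reversed prefix sum, the list gains
-- `s` (warm-up) or `s - wmin k` (DP step)
def refStep (rev : List Int) (k : Nat) (st : Int × List Int) (i : Nat) : Int × List Int :=
  let s := st.1 + rev.getD i 0
  (s, st.2 ++ [if i < k then s else s - wmin k st.2])

def ref (rev : List Int) (k : Nat) (i : Nat) : Int × List Int :=
  (List.range i).foldl (refStep rev k) (0, [])

theorem ref_succ (rev : List Int) (k i : Nat) :
    ref rev k (i + 1) = refStep rev k (ref rev k i) i := by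
  simp [ref, List.range_succ]

theorem ref_len (rev : List Int) (k i : Nat) : (ref rev k i).2.length = i := by
  induction i with
  | zero => simp [ref]
  | succ m ih => rw [ref_succ]; simp [refStep, ih]

-- A's value-by-negative-index is the value of the reversed list
theorem idx_rev (l : List Int) (i : Nat) (h : i < l.length) :
    (PySem.List.pyGet? l (-(i : Int) - 1)).getD 0 = l.reverse.getD i 0 := by
  have h1 : (-(i : Int) - 1) = -((i + 1 : Nat) : Int) := by push_cast; ring
  rw [h1, PySem.List.pyGet?_neg_natCast l (i + 1) (by omega) (by omega)]
  have h2 : l.reverse.getD i 0 = (l.reverse[i]?).getD 0 := by simp [List.getD]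
  rw [h2, List.getElem?_reverse h]
  have h3 : l.length - (i + 1) = l.length - 1 - i := by omega
  rw [h3]

def abody1 (l : List Int) (st : Int × List Int) (index : Int) : Int × List Int :=
  let s := st.1 + (PySem.List.pyGet? l (-index - 1)).getD 0
  (s, st.2 ++ [s])

def abody2 (l : List Int) (k' : Int) (st : Int × List Int) (index : Int) : Int × List Int :=
  let s := st.1 + (PySem.List.pyGet? l (-index - 1)).getD 0
  let mp := st.2 ++ [s - (PySem.List.pyGet? st.2 (-1)).getD 0]
  let mp :=
    (PySem.List.pyRange 1 k' 1).foldl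
      (fun mp index2 =>
        mp.dropLast ++
          [max ((PySem.List.pyGet? mp (-1)).getD 0)
               (s - (PySem.List.pyGet? mp (-index2 - 2)).getD 0)])
      mp
  (s, mp)

theorem A_unfold (l : List Int) (k' : Int) (h : ¬ (l.length : Int) ≤ k') :
    get_max_points l k'
      = (PySem.List.pyGet?
          ((PySem.List.pyRange k' (l.length : Int) 1).foldl (abody2 l k')
            ((PySem.List.pyRange 0 k' 1).foldl (abody1 l) (0, []))).2 (-1)).getD 0 := by
  rw [get_max_points, if_neg h]
  rfl


-- ===== the A side =====

theorem A_init (l : List Int) (k : Nat) (hkn : k < l.length) :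
    ∀ m, m ≤ k →
      (PySem.List.pyRange 0 (m : Int) 1).foldl (abody1 l) (0, []) = ref l.reverse k m := by
  intro m
  induction m with
  | zero => intro _; rw [PySem.List.pyRange_one_eq_nil (by omega)]; simp [ref]
  | succ m ih =>
    intro hm
    have hc : ((m + 1 : Nat) : Int) = (m : Int) + 1 := by push_cast; ring
    rw [hc, PySem.List.pyRange_one_succ_right (by omega), List.foldl_append,
        ih (by omega), ref_succ]
    simp only [List.foldl_cons, List.foldl_nil, abody1, refStep]
    rw [idx_rev l m (by omega)]
    rw [if_pos (by omega : m < k)]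

theorem A_main (l : List Int) (k : Nat) (hk1 : 1 ≤ k) :
    ∀ m, k + m ≤ l.length →
      (PySem.List.pyRange (k : Int) ((k + m : Nat) : Int) 1).foldl (abody2 l (k : Int))
          (ref l.reverse k k)
        = ref l.reverse k (k + m) := by
  intro m
  induction m with
  | zero => intro _; rw [PySem.List.pyRange_one_eq_nil (by omega)]; simp
  | succ m ih =>
    intro hm
    have hc : ((k + (m + 1) : Nat) : Int) = ((k + m : Nat) : Int) + 1 := by push_cast; ring
    rw [hc, PySem.List.pyRange_one_succ_right (by push_cast; omega), List.foldl_append,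
        ih (by omega)]
    simp only [List.foldl_cons, List.foldl_nil, abody2]
    rw [idx_rev l (k + m) (by omega), pyGet_neg_one_g0]
    have hlen : (ref l.reverse k (k + m)).2.length = k + m := ref_len _ _ _
    rw [innerFold _ _ k hk1 (by omega)]
    have hidx : k + (m + 1) = (k + m) + 1 := by omega
    rw [hidx, ref_succ]
    simp only [refStep]
    rw [if_neg (by omega : ¬ (k + m < k))]

theorem A_eq_ref (card_points : List Int) (max_card_once : Int)
    (hk : 1 ≤ max_card_once) (hn : max_card_once < (card_points.length : Int)) :
    get_max_points card_points max_card_once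
      = ((ref card_points.reverse max_card_once.toNat card_points.length).2).getLastD 0 := by
  set k := max_card_once.toNat with hkdef
  have hck : (k : Int) = max_card_once := by omega
  have hkn : k < card_points.length := by omega
  rw [A_unfold card_points max_card_once (by omega), ← hck]
  have hcn : ((card_points.length : Nat) : Int) = ((k + (card_points.length - k) : Nat) : Int) := by
    push_cast; omega
  rw [A_init card_points k hkn k (le_refl k), hcn,
      A_main card_points k (by omega) (card_points.length - k) (by omega)]
  have hfix : k + (card_points.length - k) = card_points.length := by omega
  rw [hfix, PySem.List.pyGet?_neg_one]
  have hne : (ref card_points.reverse k card_points.length).2 ≠ [] := by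
    intro h
    have := ref_len card_points.reverse k card_points.length
    rw [h] at this
    simp at this
    omega
  simp [List.getLastD_eq_getLast?]

-- ===== the B side =====

theorem popWhileGE_eq (dp : List Int) (v : Int) (dq : List Nat) :
    popWhileGE dp v dq
      = (dq.reverse.dropWhile (fun j => decide (v ≤ dp.getD j 0))).reverse := by
  induction dq using List.reverseRecOn with
  | nil =>
    rw [popWhileGE]
    split
    next => simp
    next j h => simp at h
  | append_singleton l a ih =>
    rw [popWhileGE]
    simp only [List.dropLast_concat, List.reverse_append, List.reverse_cons,
      List.reverse_nil, List.nil_append, List.cons_append]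
    split
    next h => simp at h
    next j h =>
      rw [List.getLast?_concat] at h
      injection h with h
      subst h
      by_cases hp : v ≤ dp.getD a 0
      · rw [if_pos hp, List.dropWhile_cons_of_pos (by simpa using hp), ih]
      · rw [if_neg hp, List.dropWhile_cons_of_neg (by simpa using hp)]
        simp

theorem popWhileGE_decomp (dp : List Int) (v : Int) (dq : List Nat) :
    dq = popWhileGE dp v dq
      ++ ((dq.reverse.takeWhile (fun j => decide (v ≤ dp.getD j 0))).reverse) := by
  rw [popWhileGE_eq]
  rw [← List.reverse_append, List.takeWhile_append_dropWhile, List.reverse_reverse]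

theorem popWhileGE_removed (dp : List Int) (v : Int) (dq : List Nat) (j : Nat)
    (hj : j ∈ (dq.reverse.takeWhile (fun j => decide (v ≤ dp.getD j 0))).reverse) :
    v ≤ dp.getD j 0 := by
  rw [List.mem_reverse] at hj
  simpa using List.mem_takeWhile_imp hj

theorem popWhileGE_last (dp : List Int) (v : Int) (dq : List Nat) (x : Nat)
    (hx : (popWhileGE dp v dq).getLast? = some x) : dp.getD x 0 < v := by
  rw [popWhileGE_eq, List.getLast?_reverse] at hx
  have h' : (dq.reverse.dropWhile (fun j => decide (v ≤ dp.getD j 0))) ≠ [] := by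
    intro hn
    rw [hn] at hx
    simp at hx
  have hhead := List.head_dropWhile_not (fun j => decide (v ≤ dp.getD j 0))
    (l := dq.reverse) h'
  rw [List.head?_eq_some_head h'] at hx
  have hx2 := Option.some.inj hx
  rw [← hx2]
  simpa using hhead

theorem pairwise_imp_mem {R S : Nat → Nat → Prop} (l : List Nat) (hp : l.Pairwise R)
    (him : ∀ a ∈ l, ∀ b ∈ l, R a b → S a b) : l.Pairwise S := by
  induction hp with
  | nil => exact List.Pairwise.nil
  | cons h _ ih =>
    refine List.Pairwise.cons ?_ (ih ?_)
    · intro b hb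
      exact him _ (List.mem_cons_self ..) b (List.mem_cons_of_mem _ hb) (h b hb)
    · intro a ha b hb hr
      exact him a (List.mem_cons_of_mem _ ha) b (List.mem_cons_of_mem _ hb) hr

theorem popWhileGE_sublist (dp : List Int) (v : Int) (dq : List Nat) :
    (popWhileGE dp v dq).Sublist dq := by
  conv_rhs => rw [popWhileGE_decomp dp v dq]
  exact List.sublist_append_left _ _

theorem getD_append_len (l : List Int) (v : Int) : (l ++ [v]).getD l.length 0 = v := by
  simp [List.getD]

theorem pairwise_ends {R : Nat → Nat → Prop} (l : List Nat) (hne : l ≠ [])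
    (hp : l.Pairwise R) : ∀ a ∈ l, a = l.getLast hne ∨ R a (l.getLast hne) := by
  intro a ha
  have hdec : l.dropLast ++ [l.getLast hne] = l := List.dropLast_concat_getLast hne
  rw [← hdec] at hp ha
  rw [List.pairwise_append] at hp
  rcases List.mem_append.mp ha with h | h
  · exact Or.inr (hp.2.2 a h _ (List.mem_singleton_self _))
  · exact Or.inl (List.mem_singleton.mp h)

-- invariant carried through B's loop: the (sum, dp) pair is the reference state and the
-- deque holds exactly the useful window indices, increasing in index and dp-value
def BInv (rev : List Int) (k i : Nat) (st : Int × List Int × List Nat) : Prop :=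
  (st.1, st.2.1) = ref rev k i ∧
  st.2.2.Pairwise (fun a b => a < b ∧ st.2.1.getD a 0 < st.2.1.getD b 0) ∧
  (∀ d ∈ st.2.2, d < i ∧ i ≤ d + k) ∧
  (∀ j : Nat, j < i → i ≤ j + k →
    ∃ d ∈ st.2.2, j ≤ d ∧ st.2.1.getD d 0 ≤ st.2.1.getD j 0)

theorem head_min (rev : List Int) (k i : Nat) (s0 : Int) (dp : List Int) (dq : List Nat)
    (hinv : BInv rev k i (s0, dp, dq)) (hi : 1 ≤ i) (hk : 1 ≤ k) :
    dp.getD (dq.headD 0) 0 = wmin k dp := by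
  obtain ⟨href, hpw, hrange, hcover⟩ := hinv
  have hdplen : dp.length = i := by
    have := congrArg (fun x => x.2.length) href
    simpa [ref_len] using this
  have hdpne : dp ≠ [] := by intro h; rw [h] at hdplen; simp at hdplen; omega
  obtain ⟨d0, hd0, _⟩ := hcover (i - 1) (by omega) (by omega)
  have hdqne : dq ≠ [] := by intro h; rw [h] at hd0; simp at hd0
  obtain ⟨h2, t2, rfl⟩ : ∃ h t, dq = h :: t := by
    cases dq with
    | nil => exact absurd rfl hdqne
    | cons x xs => exact ⟨x, xs, rfl⟩
  simp only [List.headD_cons]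
  have hhead : ∀ a ∈ h2 :: t2, dp.getD h2 0 ≤ dp.getD a 0 := by
    intro a ha
    rcases List.mem_cons.mp ha with rfl | ha'
    · exact le_refl _
    · exact le_of_lt ((List.pairwise_cons.mp hpw).1 a ha').2
  obtain ⟨hmemw, hlb⟩ := wmin_spec k dp hk hdpne
  apply le_antisymm
  · -- dp[h2] ≤ wmin: wmin is some window value, cover + head-min-ness
    obtain ⟨j, hj, hj2, hx⟩ := window_mem dp k _ hmemw
    obtain ⟨d, hd, _, hdj⟩ := hcover j (by omega) (by omega)
    rw [hx]
    exact le_trans (hhead d hd) hdj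
  · -- wmin ≤ dp[h2]: dp[h2] is a window value
    have hr := hrange h2 (List.mem_cons_self ..)
    exact hlb _ (mem_window dp k h2 (by omega) (by omega))

def bbody (rev : List Int) (k : Nat) (st : Int × List Int × List Nat) (i : Nat) :
    Int × List Int × List Nat :=
  let s := st.1 + rev.getD i 0
  let dp := st.2.1
  let dq := st.2.2
  let v := if i < k then s else s - dp.getD (dq.headD 0) 0
  let dp := dp ++ [v]
  let dq := popWhileGE dp v dq
  let dq := dq ++ [i]
  let dq := if dq.headD 0 + k ≤ i then dq.tail else dq
  (s, dp, dq)

theorem B_unfold (l : List Int) (k' : Int) (h : ¬ (l.length : Int) ≤ k') :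
    get_max_points_alt l k'
      = ((List.range l.length).foldl (bbody l.reverse k'.toNat) (0, [], [])).2.1.getLastD 0 := by
  rw [get_max_points_alt, if_neg h]
  rfl

theorem inv_step (rev : List Int) (k i : Nat) (st : Int × List Int × List Nat)
    (hk : 1 ≤ k) (hinv : BInv rev k i st) : BInv rev k (i + 1) (bbody rev k st i) := by
  obtain ⟨s0, dp, dq⟩ := st
  obtain ⟨href, hpw, hrange, hcover⟩ := hinv
  have hdplen : dp.length = i := by
    have := congrArg (fun x => x.2.length) href
    simpa [ref_len] using this
  simp only [bbody]
  set s := s0 + rev.getD i 0 with hs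
  set v := (if i < k then s else s - dp.getD (dq.headD 0) 0) with hv
  set dp' := dp ++ [v] with hdp'
  set dq1 := popWhileGE dp' v dq with hdq1
  -- basic value facts
  have hstab : ∀ j, j < i → dp'.getD j 0 = dp.getD j 0 := by
    intro j hj
    exact List.getD_append dp [v] 0 j (by omega)
  have hvi : dp'.getD i 0 = v := by rw [hdp', ← hdplen]; exact getD_append_len dp v
  have hrefstep : (s, dp') = ref rev k (i + 1) := by
    rw [ref_succ, ← href]
    simp only [refStep]
    by_cases hik : i < k
    · simp [hdp', hv, hs, hik]
    · rw [hdp', hv, if_neg hik, if_neg hik,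
        head_min rev k i s0 dp dq ⟨href, hpw, hrange, hcover⟩ (by omega) hk]
  -- deque facts
  have hrem : ∀ j ∈ (dq.reverse.takeWhile (fun j => decide (v ≤ dp'.getD j 0))).reverse,
      v ≤ dp'.getD j 0 := fun j hj => popWhileGE_removed dp' v dq j hj
  have hmem1 : ∀ d ∈ dq1, d ∈ dq := fun d hd => (popWhileGE_sublist dp' v dq).subset hd
  have hpw' : dq.Pairwise (fun a b => a < b ∧ dp'.getD a 0 < dp'.getD b 0) := by
    refine pairwise_imp_mem dq hpw ?_
    intro a ha b hb hab
    have h1 := (hrange a ha).1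
    have h2 := (hrange b hb).1
    rw [hstab a (by omega), hstab b (by omega)]
    exact hab
  have hpw1 : dq1.Pairwise (fun a b => a < b ∧ dp'.getD a 0 < dp'.getD b 0) :=
    List.Pairwise.sublist (popWhileGE_sublist dp' v dq) hpw'
  have hlt_v : ∀ a ∈ dq1, dp'.getD a 0 < v := by
    intro a ha
    have hne : dq1 ≠ [] := by intro h; rw [h] at ha; simp at ha
    have hlast : dp'.getD (dq1.getLast hne) 0 < v := by
      have hx : dq1.getLast? = some (dq1.getLast hne) := List.getLast?_eq_some_getLast hne
      conv at hx => lhs; rw [hdq1]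
      exact popWhileGE_last dp' v dq _ hx
    rcases pairwise_ends dq1 hne hpw1 a ha with h | h
    · rw [h]; exact hlast
    · exact lt_trans h.2 hlast
  have hpw2 : (dq1 ++ [i]).Pairwise (fun a b => a < b ∧ dp'.getD a 0 < dp'.getD b 0) := by
    rw [List.pairwise_append]
    refine ⟨hpw1, List.pairwise_singleton _ _, ?_⟩
    intro a ha b hb
    rw [List.mem_singleton.mp hb]
    exact ⟨(hrange a (hmem1 a ha)).1, by rw [hvi]; exact hlt_v a ha⟩
  obtain ⟨h2, t2, hsplit2⟩ : ∃ h t, dq1 ++ [i] = h :: t := by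
    cases hq : dq1 ++ [i] with
    | nil => exact absurd hq (by simp)
    | cons x xs => exact ⟨x, xs, rfl⟩
  have hmem2 : ∀ d ∈ dq1 ++ [i], d ∈ dq1 ∨ d = i := by
    intro d hd
    rcases List.mem_append.mp hd with h | h
    · exact Or.inl h
    · exact Or.inr (List.mem_singleton.mp h)
  have hh2mem : h2 ∈ dq1 ++ [i] := by rw [hsplit2]; exact List.mem_cons_self ..
  have hh2le : ∀ a ∈ dq1 ++ [i], h2 ≤ a := by
    intro a ha
    rw [hsplit2] at ha
    rcases List.mem_cons.mp ha with rfl | ha'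
    · exact le_refl _
    · have := hpw2; rw [hsplit2] at this
      exact le_of_lt ((List.pairwise_cons.mp this).1 a ha').1
  have hle_i : ∀ d ∈ dq1 ++ [i], d ≤ i := by
    intro d hd
    rcases hmem2 d hd with h | h
    · exact le_of_lt (hrange d (hmem1 d h)).1
    · omega
  have hik' : ∀ d ∈ dq1 ++ [i], i + 1 ≤ d + k ∨ (d + k ≤ i ∧ d = h2) := by
    intro d hd
    rcases hmem2 d hd with h | h
    · have hr := hrange d (hmem1 d h)
      by_cases hc : i + 1 ≤ d + k
      · exact Or.inl hc
      · -- d + k = i; show d is the head: any a ∈ dq1++[i] with a < d would violate i ≤ a + k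
        have hdk : d + k = i := by omega
        right
        refine ⟨by omega, ?_⟩
        have hh2d : h2 ≤ d := hh2le d hd
        rcases hmem2 h2 hh2mem with hh | hh
        · have hr2 := hrange h2 (hmem1 h2 hh)
          omega
        · -- h2 = i impossible: h2 ≤ d and d < i
          exfalso; have := hr.1; omega
    · subst h; left; omega
  -- i is in the final deque in either case
  by_cases hexp : (dq1 ++ [i]).headD 0 + k ≤ i
  case pos =>
    rw [if_pos hexp]
    have hh2 : (dq1 ++ [i]).headD 0 = h2 := by rw [hsplit2]; rfl
    rw [hh2] at hexp
    have htail : (dq1 ++ [i]).tail = t2 := by rw [hsplit2, List.tail_cons]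
    rw [htail]
    have hpwt : t2.Pairwise (fun a b => a < b ∧ dp'.getD a 0 < dp'.getD b 0) := by
      have := hpw2; rw [hsplit2] at this
      exact (List.pairwise_cons.mp this).2
    have hh2lt : ∀ a ∈ t2, h2 < a := by
      intro a ha
      have := hpw2; rw [hsplit2] at this
      exact ((List.pairwise_cons.mp this).1 a ha).1
    have hi_t2 : i ∈ t2 := by
      have : i ∈ dq1 ++ [i] := by simp
      rw [hsplit2] at this
      rcases List.mem_cons.mp this with h | h
      · exfalso; omega
      · exact h
    refine ⟨hrefstep, hpwt, ?_, ?_⟩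
    · intro d hd
      have hd2 : d ∈ dq1 ++ [i] := by rw [hsplit2]; exact List.mem_cons_of_mem _ hd
      have hdlei := hle_i d hd2
      rcases hik' d hd2 with h | h
      · exact ⟨by omega, h⟩
      · exfalso; have := hh2lt d hd; omega
    · intro j hj hjk
      by_cases hji : j = i
      · exact ⟨i, hi_t2, le_of_eq hji, by rw [hji]⟩
      · have hji' : j < i := by omega
        obtain ⟨d, hd, hjd, hdj⟩ := hcover j hji' (by omega)
        have hdlt : d < i := (hrange d hd).1
        have hdj' : dp'.getD d 0 ≤ dp'.getD j 0 := by
          rw [hstab d (by omega), hstab j (by omega)]; exact hdj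
        rcases (by rw [popWhileGE_decomp dp' v dq] at hd; exact List.mem_append.mp hd :
            d ∈ dq1 ∨ d ∈ (dq.reverse.takeWhile (fun j => decide (v ≤ dp'.getD j 0))).reverse)
          with hin | hout
        · -- survivor: show it is not the expired head
          have hd2 : d ∈ dq1 ++ [i] := List.mem_append_left _ hin
          rw [hsplit2] at hd2
          rcases List.mem_cons.mp hd2 with rfl | hdt
          · exfalso; omega
          · exact ⟨d, hdt, hjd, hdj'⟩
        · -- popped: the new element i is at least as small
          refine ⟨i, hi_t2, by omega, ?_⟩
          rw [hvi]
          exact le_trans (hrem d hout) hdj'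
  case neg =>
    rw [if_neg hexp]
    have hh2 : (dq1 ++ [i]).headD 0 = h2 := by rw [hsplit2]; rfl
    rw [hh2] at hexp
    refine ⟨hrefstep, hpw2, ?_, ?_⟩
    · intro d hd
      have hdlei := hle_i d hd
      rcases hik' d hd with h | h
      · exact ⟨by omega, h⟩
      · exfalso; omega
    · intro j hj hjk
      have hiin : i ∈ dq1 ++ [i] := by simp
      by_cases hji : j = i
      · exact ⟨i, hiin, le_of_eq hji, by rw [hji]⟩
      · have hji' : j < i := by omega
        obtain ⟨d, hd, hjd, hdj⟩ := hcover j hji' (by omega)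
        have hdlt : d < i := (hrange d hd).1
        have hdj' : dp'.getD d 0 ≤ dp'.getD j 0 := by
          rw [hstab d (by omega), hstab j (by omega)]; exact hdj
        rcases (by rw [popWhileGE_decomp dp' v dq] at hd; exact List.mem_append.mp hd :
            d ∈ dq1 ∨ d ∈ (dq.reverse.takeWhile (fun j => decide (v ≤ dp'.getD j 0))).reverse)
          with hin | hout
        · exact ⟨d, List.mem_append_left _ hin, hjd, hdj'⟩
        · refine ⟨i, hiin, by omega, ?_⟩
          rw [hvi]
          exact le_trans (hrem d hout) hdj'

theorem B_inv (rev : List Int) (k : Nat) (hk : 1 ≤ k) :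
    ∀ n, BInv rev k n ((List.range n).foldl (bbody rev k) (0, [], [])) := by
  intro n
  induction n with
  | zero =>
    refine ⟨by simp [ref], List.Pairwise.nil, ?_, ?_⟩
    · intro d hd; simp at hd
    · intro j hj; omega
  | succ m ih =>
    rw [List.range_succ, List.foldl_append, List.foldl_cons, List.foldl_nil]
    exact inv_step rev k m _ hk ih

theorem B_eq_ref (card_points : List Int) (max_card_once : Int)
    (hk : 1 ≤ max_card_once) (hn : max_card_once < (card_points.length : Int)) :
    get_max_points_alt card_points max_card_once
      = ((ref card_points.reverse max_card_once.toNat card_points.length).2).getLastD 0 := by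
  rw [B_unfold card_points max_card_once (by omega)]
  have hinv := B_inv card_points.reverse max_card_once.toNat (by omega) card_points.length
  have := congrArg Prod.snd hinv.1
  simp only at this
  rw [this]

-- ===== VERDICT (by name: the statement is the Claim_ definition above) =====
theorem get_max_points_spec : Claim_equal_get_max_points := by
  intro card_points max_card_once _ hpre
  unfold Spec_get_max_points
  by_cases h : (card_points.length : Int) ≤ max_card_once
  · simp [get_max_points, get_max_points_alt, h]
  · have hk : 1 ≤ max_card_once := by
      rcases hpre with h' | h'
      · exact absurd h' h
      · exact h'
    rw [A_eq_ref card_points max_card_once hk (by omega),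
        B_eq_ref card_points max_card_once hk (by omega)]
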